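-- pv_equiv track=rewrite | github.com/brramantyo/food_pantry | evaluate_detect_classify.py | merge_predictions
-- ===== SOURCE A (Python) =====
-- CANONICAL_CATEGORIES = {
--     "baby food": "Baby Food",
--     "beans and legumes - canned or dried": "Beans and Legumes - Canned or Dried",
--     "bread and bakery products": "Bread and Bakery Products",
--     "canned tomato products": "Canned Tomato Products",
--     "carbohydrate meal": "Carbohydrate Meal",
--     "condiments and sauces": "Condiments and Sauces",
--     "dairy and dairy alternatives": "Dairy and Dairy Alternatives",
--     "desserts and sweets": "Desserts and Sweets",
--     "drinks": "Drinks",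
--     "fresh fruit": "Fresh Fruit",
--     "fruits - canned or processed": "Fruits - Canned or Processed",
--     "granola products": "Granola Products",
--     "meat and poultry - canned": "Meat and Poultry - Canned",
--     "meat and poultry - fresh": "Meat and Poultry - Fresh",
--     "nut butters and nuts": "Nut Butters and Nuts",
--     "ready meals": "Ready Meals",
--     "savory snacks and crackers": "Savory Snacks and Crackers",
--     "seafood - canned": "Seafood - Canned",
--     "soup": "Soup",
--     "vegetables - canned": "Vegetables - Canned",
--     "vegetables - fresh": "Vegetables - Fresh",
-- }
--
-- VALID_CATEGORIES = set(CANONICAL_CATEGORIES.values())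
--
-- def normalize_category(name):
--     return CANONICAL_CATEGORIES.get(name.lower().strip(), name)
--
-- def merge_predictions(crop_predictions):
--     """
--     Merge predictions from multiple crops into a single prediction.
--     Deduplicate categories, keep highest confidence.
--     """
--     seen_categories = {}
--     for pred in crop_predictions:
--         if not pred:
--             continue
--         items = pred.get("items", [])
--         for item in items:
--             name = normalize_category(item.get("name", ""))
--             if name not in VALID_CATEGORIES:
--                 continue
--             conf = item.get("confidence", "medium")
--             pkg = item.get("package_type", "unknown")
--
--             if name not in seen_categories:
--                 seen_categories[name] = {"name": name, "package_type": pkg, "confidence": conf}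
--             else:
--                 # Keep higher confidence
--                 conf_order = {"high": 3, "medium": 2, "low": 1}
--                 if conf_order.get(conf, 0) > conf_order.get(seen_categories[name]["confidence"], 0):
--                     seen_categories[name] = {"name": name, "package_type": pkg, "confidence": conf}
--
--     return {"items": list(seen_categories.values())}
-- ===== SOURCE B (Python) =====
-- CANONICAL_CATEGORIES = {
--     "baby food": "Baby Food",
--     "beans and legumes - canned or dried": "Beans and Legumes - Canned or Dried",
--     "bread and bakery products": "Bread and Bakery Products",
--     "canned tomato products": "Canned Tomato Products",
--     "carbohydrate meal": "Carbohydrate Meal",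
--     "condiments and sauces": "Condiments and Sauces",
--     "dairy and dairy alternatives": "Dairy and Dairy Alternatives",
--     "desserts and sweets": "Desserts and Sweets",
--     "drinks": "Drinks",
--     "fresh fruit": "Fresh Fruit",
--     "fruits - canned or processed": "Fruits - Canned or Processed",
--     "granola products": "Granola Products",
--     "meat and poultry - canned": "Meat and Poultry - Canned",
--     "meat and poultry - fresh": "Meat and Poultry - Fresh",
--     "nut butters and nuts": "Nut Butters and Nuts",
--     "ready meals": "Ready Meals",
--     "savory snacks and crackers": "Savory Snacks and Crackers",
--     "seafood - canned": "Seafood - Canned",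
--     "soup": "Soup",
--     "vegetables - canned": "Vegetables - Canned",
--     "vegetables - fresh": "Vegetables - Fresh",
-- }
--
-- VALID_CATEGORIES = set(CANONICAL_CATEGORIES.values())
--
-- CONF_ORDER = {"high": 3, "medium": 2, "low": 1}
--
--
-- def normalize_category(name):
--     return CANONICAL_CATEGORIES.get(name.lower().strip(), name)
--
--
-- def merge_predictions(crop_predictions):
--     """Two-pass merge: group candidate items by normalized category name,
--     then pick the best candidate of each group (first one with the highest
--     confidence rank)."""
--     groups = {}
--     for pred in crop_predictions:
--         if not pred:
--             continue
--         for item in pred.get("items", []):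
--             name = normalize_category(item.get("name", ""))
--             if name in VALID_CATEGORIES:
--                 groups[name] = groups.get(name, []) + [item]
--
--     merged = []
--     for name, cands in groups.items():
--         best = cands[0]
--         for it in cands[1:]:
--             if CONF_ORDER.get(it.get("confidence", "medium"), 0) > \
--                     CONF_ORDER.get(best.get("confidence", "medium"), 0):
--                 best = it
--         merged.append({
--             "name": name,
--             "package_type": best.get("package_type", "unknown"),
--             "confidence": best.get("confidence", "medium"),
--         })
--     return {"items": merged}
-- ===== Notes on version B (the rewrite author's own statement) =====
-- stated objective: alternative
-- what changed: A keeps a dict of running winner records and decides the winner while scanning; B is a two-pass merge: it first groups all surviving candidate items by normalized category name, then reduces each group to its first highest-confidence candidate and builds the records from those.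
import Mathlib
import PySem

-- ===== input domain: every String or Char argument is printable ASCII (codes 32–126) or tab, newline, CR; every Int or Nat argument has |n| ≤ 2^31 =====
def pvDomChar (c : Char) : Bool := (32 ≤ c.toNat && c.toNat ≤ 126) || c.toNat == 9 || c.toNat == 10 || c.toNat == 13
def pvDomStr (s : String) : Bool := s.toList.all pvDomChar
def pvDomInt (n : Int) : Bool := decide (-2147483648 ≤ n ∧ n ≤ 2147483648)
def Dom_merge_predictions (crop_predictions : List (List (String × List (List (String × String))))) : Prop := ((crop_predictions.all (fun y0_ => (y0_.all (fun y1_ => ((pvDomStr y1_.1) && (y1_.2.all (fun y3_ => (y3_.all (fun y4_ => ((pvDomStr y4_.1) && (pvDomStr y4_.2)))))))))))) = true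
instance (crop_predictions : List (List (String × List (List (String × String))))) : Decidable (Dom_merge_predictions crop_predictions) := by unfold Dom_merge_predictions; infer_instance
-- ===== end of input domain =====

-- B replaces A's single-pass dict of running winners by a two-pass merge (group all valid
-- candidate items by normalized name, then reduce each group to its first best-confidence
-- candidate); objective: alternative decomposition, same asymptotic cost.

-- ===== shared module-level constants (CANONICAL_CATEGORIES, VALID_CATEGORIES, conf_order) =====
def canonicalCategories : PySem.Dict String String := PySem.Dict.ofList [
  ("baby food", "Baby Food"),
  ("beans and legumes - canned or dried", "Beans and Legumes - Canned or Dried"),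
  ("bread and bakery products", "Bread and Bakery Products"),
  ("canned tomato products", "Canned Tomato Products"),
  ("carbohydrate meal", "Carbohydrate Meal"),
  ("condiments and sauces", "Condiments and Sauces"),
  ("dairy and dairy alternatives", "Dairy and Dairy Alternatives"),
  ("desserts and sweets", "Desserts and Sweets"),
  ("drinks", "Drinks"),
  ("fresh fruit", "Fresh Fruit"),
  ("fruits - canned or processed", "Fruits - Canned or Processed"),
  ("granola products", "Granola Products"),
  ("meat and poultry - canned", "Meat and Poultry - Canned"),
  ("meat and poultry - fresh", "Meat and Poultry - Fresh"),
  ("nut butters and nuts", "Nut Butters and Nuts"),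
  ("ready meals", "Ready Meals"),
  ("savory snacks and crackers", "Savory Snacks and Crackers"),
  ("seafood - canned", "Seafood - Canned"),
  ("soup", "Soup"),
  ("vegetables - canned", "Vegetables - Canned"),
  ("vegetables - fresh", "Vegetables - Fresh")]

def validCategories : PySem.Set String := PySem.Set.ofList (PySem.Dict.values canonicalCategories)

def normalizeCategory (name : String) : String :=
  PySem.Dict.getD canonicalCategories (PySem.Str.strip (PySem.Str.lower name)) name

def confOrder : PySem.Dict String Int :=
  PySem.Dict.ofList [("high", 3), ("medium", 2), ("low", 1)]

-- ===== PORT A =====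
-- loop body of A's inner 'for item in items' loop
def mergeStepA (seen : PySem.Dict String (List (String × String))) (item : List (String × String)) :
    PySem.Dict String (List (String × String)) :=
  let name := normalizeCategory (PySem.Dict.getD ⟨item⟩ "name" "")
  if (PySem.Set.contains validCategories name) = false then seen
  else
    let conf := PySem.Dict.getD ⟨item⟩ "confidence" "medium"
    let pkg := PySem.Dict.getD ⟨item⟩ "package_type" "unknown"
    if (PySem.Dict.contains seen name) = false then
      PySem.Dict.insert seen name [("name", name), ("package_type", pkg), ("confidence", conf)]
    else
      -- seen_categories[name] is guarded by the contains check; its dict always carries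
      -- the "confidence" key, so '(get? …).getD' defaults are never taken (exact here)
      let cur := (PySem.Dict.get? seen name).getD []
      if PySem.Dict.getD confOrder conf 0 >
         PySem.Dict.getD confOrder ((PySem.Dict.get? ⟨cur⟩ "confidence").getD "") 0 then
        PySem.Dict.insert seen name [("name", name), ("package_type", pkg), ("confidence", conf)]
      else seen

def merge_predictions (crop_predictions : List (List (String × List (List (String × String))))) :
    List (String × List (List (String × String))) :=
  let seen : PySem.Dict String (List (String × String)) :=
    crop_predictions.foldl (fun seen pred =>
      if pred.isEmpty then seen
      else
        let items := PySem.Dict.getD ⟨pred⟩ "items" []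
        items.foldl mergeStepA seen) PySem.Dict.empty
  [("items", PySem.Dict.values seen)]

-- ===== PORT B =====
-- first pass: append each surviving item to its category's candidate list
def groupStepB (groups : PySem.Dict String (List (List (String × String)))) (item : List (String × String)) :
    PySem.Dict String (List (List (String × String))) :=
  let name := normalizeCategory (PySem.Dict.getD ⟨item⟩ "name" "")
  if PySem.Set.contains validCategories name then
    PySem.Dict.insert groups name (PySem.Dict.getD groups name [] ++ [item])
  else groups

-- second pass: first candidate with strictly-greatest confidence rank ('best' loop of Source B)
def bestCand (cands : List (List (String × String))) : List (String × String) :=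
  match cands with
  | [] => []   -- unreachable in B: every group holds at least one candidate
  | c :: rest => rest.foldl (fun best it =>
      if PySem.Dict.getD confOrder (PySem.Dict.getD ⟨it⟩ "confidence" "medium") 0 >
         PySem.Dict.getD confOrder (PySem.Dict.getD ⟨best⟩ "confidence" "medium") 0 then it
      else best) c

def merge_predictions_alt (crop_predictions : List (List (String × List (List (String × String))))) :
    List (String × List (List (String × String))) :=
  let groups : PySem.Dict String (List (List (String × String))) :=
    crop_predictions.foldl (fun groups pred =>
      if pred.isEmpty then groups
      else (PySem.Dict.getD ⟨pred⟩ "items" []).foldl groupStepB groups) PySem.Dict.empty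
  [("items", groups.items.map (fun p =>
      let best := bestCand p.2
      [("name", p.1),
       ("package_type", PySem.Dict.getD ⟨best⟩ "package_type" "unknown"),
       ("confidence", PySem.Dict.getD ⟨best⟩ "confidence" "medium")]))]

-- ===== PRECONDITION & SPEC =====
def Spec_merge_predictions (crop_predictions : List (List (String × List (List (String × String))))) (out : List (String × List (List (String × String)))) : Prop := out = merge_predictions_alt crop_predictions
instance (crop_predictions : List (List (String × List (List (String × String))))) (out : List (String × List (List (String × String)))) : Decidable (Spec_merge_predictions crop_predictions out) := by unfold Spec_merge_predictions; infer_instance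

-- ===== CLAIM (what is proved, stated in full; the proofs are below) =====
def Claim_equal_merge_predictions : Prop := ∀ (crop_predictions : List (List (String × List (List (String × String))))), Dom_merge_predictions crop_predictions → Spec_merge_predictions crop_predictions (merge_predictions crop_predictions)

-- ===== LEMMAS AND PROOFS =====
set_option maxHeartbeats 1000000

-- the final record A keeps for a category, as a function of the best candidate B keeps
def mkItem (name : String) (it : List (String × String)) : List (String × String) :=
  [("name", name),
   ("package_type", PySem.Dict.getD ⟨it⟩ "package_type" "unknown"),
   ("confidence", PySem.Dict.getD ⟨it⟩ "confidence" "medium")]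

def Fp (p : String × List (List (String × String))) : String × List (String × String) :=
  (p.1, mkItem p.1 (bestCand p.2))

def mapF (g : PySem.Dict String (List (List (String × String)))) :
    PySem.Dict String (List (String × String)) := ⟨g.items.map Fp⟩

def rk (it : List (String × String)) : Int :=
  PySem.Dict.getD confOrder (PySem.Dict.getD ⟨it⟩ "confidence" "medium") 0

def InvG (g : PySem.Dict String (List (List (String × String)))) : Prop :=
  g.keys.Nodup ∧ ∀ p ∈ g.items, p.2 ≠ []

theorem find?_map_Fp (l : List (String × List (List (String × String)))) (k : String) :
    (l.map Fp).find? (fun p => p.1 == k) = (l.find? (fun p => p.1 == k)).map Fp := by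
  induction l with
  | nil => rfl
  | cons a t ih =>
    cases h : (a.1 == k) with
    | true =>
      have h2 : ((Fp a).1 == k) = true := h
      rw [List.map_cons,
        List.find?_cons_of_pos (p := fun p => p.1 == k) (a := Fp a) h2,
        List.find?_cons_of_pos (p := fun p => p.1 == k) (a := a) h]
      rfl
    | false =>
      have h2 : ((Fp a).1 == k) = false := h
      rw [List.map_cons,
        List.find?_cons_of_neg (p := fun p => p.1 == k) (a := Fp a) (by simp [h2]),
        List.find?_cons_of_neg (p := fun p => p.1 == k) (a := a) (by simp [h]), ih]

theorem get?_mapF (g : PySem.Dict String (List (List (String × String)))) (k : String) :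
    (mapF g).get? k = (g.get? k).map (fun v => mkItem k (bestCand v)) := by
  unfold PySem.Dict.get?
  rw [show (mapF g).items = g.items.map Fp from rfl, find?_map_Fp]
  cases hf : List.find? (fun p => p.1 == k) g.items with
  | none => rfl
  | some a =>
    have h0 := List.find?_some hf
    have hk : a.1 = k := eq_of_beq h0
    subst hk
    rfl

theorem contains_mapF (g : PySem.Dict String (List (List (String × String)))) (k : String) :
    (mapF g).contains k = g.contains k := by
  rw [PySem.Dict.contains_eq_isSome_get?, PySem.Dict.contains_eq_isSome_get?, get?_mapF]
  cases g.get? k <;> rfl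

theorem keys_mapF (g : PySem.Dict String (List (List (String × String)))) :
    (mapF g).keys = g.keys := by
  unfold PySem.Dict.keys
  rw [show (mapF g).items = g.items.map Fp from rfl, List.map_map]
  exact List.map_congr_left (fun p _ => rfl)

theorem values_mapF (g : PySem.Dict String (List (List (String × String)))) :
    (mapF g).values = g.items.map (fun p => mkItem p.1 (bestCand p.2)) := by
  unfold PySem.Dict.values
  rw [show (mapF g).items = g.items.map Fp from rfl, List.map_map]
  exact List.map_congr_left (fun p _ => rfl)

theorem insert_mapF (g : PySem.Dict String (List (List (String × String)))) (k : String)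
    (w : List (List (String × String))) :
    mapF (g.insert k w) = (mapF g).insert k (mkItem k (bestCand w)) := by
  apply PySem.Dict.ext
  by_cases hc : g.contains k = true
  · have hc' : (mapF g).contains k = true := by rw [contains_mapF]; exact hc
    rw [show (mapF (g.insert k w)).items = (g.insert k w).items.map Fp from rfl,
      PySem.Dict.items_insert_of_contains g w hc,
      PySem.Dict.items_insert_of_contains (mapF g) (mkItem k (bestCand w)) hc',
      show (mapF g).items = g.items.map Fp from rfl, List.map_map, List.map_map]
    apply List.map_congr_left
    intro p _
    simp only [Function.comp_apply]
    by_cases h : (p.1 == k) = true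
    · rw [if_pos h, if_pos (show ((Fp p).1 == k) = true from h)]
      rfl
    · rw [if_neg h, if_neg (show ¬((Fp p).1 == k) = true from h)]
  · have hcf : g.contains k = false := by revert hc; cases g.contains k <;> simp
    have hc' : (mapF g).contains k = false := by rw [contains_mapF]; exact hcf
    rw [show (mapF (g.insert k w)).items = (g.insert k w).items.map Fp from rfl,
      PySem.Dict.items_insert_of_not_contains g w hcf,
      PySem.Dict.items_insert_of_not_contains (mapF g) (mkItem k (bestCand w)) hc',
      List.map_append]
    rfl

theorem insert_self_eq {ν : Type} (g : PySem.Dict String ν) (k : String) (v : ν)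
    (hnd : g.keys.Nodup) (h : g.get? k = some v) : g.insert k v = g := by
  have hc : g.contains k = true := by rw [PySem.Dict.contains_eq_isSome_get?, h]; rfl
  apply PySem.Dict.ext
  rw [PySem.Dict.items_insert_of_contains g v hc]
  conv_rhs => rw [← List.map_id g.items]
  apply List.map_congr_left
  intro p hp
  by_cases hpk : (p.1 == k) = true
  · have hek : p.1 = k := eq_of_beq hpk
    have hgp : g.get? p.1 = some p.2 :=
      PySem.Dict.get?_of_mem_items g (by rw [Prod.mk.eta]; exact hp) hnd
    rw [hek, h] at hgp
    have hv : v = p.2 := Option.some.inj hgp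
    rw [if_pos hpk, hv, ← hek]
    rfl
  · rw [if_neg hpk]
    rfl

theorem get?_mkItem_conf (k : String) (b : List (String × String)) :
    (PySem.Dict.get? ⟨mkItem k b⟩ "confidence" : Option String) =
      some (PySem.Dict.getD ⟨b⟩ "confidence" "medium") := by
  simp [mkItem, PySem.Dict.get?_mk_cons]

theorem bestCand_append (cands : List (List (String × String))) (it : List (String × String))
    (h : cands ≠ []) :
    bestCand (cands ++ [it]) = if rk it > rk (bestCand cands) then it else bestCand cands := by
  cases cands with
  | nil => exact absurd rfl h
  | cons c rest => simp [bestCand, List.foldl_append, rk]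

theorem step_comm (g : PySem.Dict String (List (List (String × String))))
    (hInv : InvG g) (item : List (String × String)) :
    mergeStepA (mapF g) item = mapF (groupStepB g item) := by
  simp only [mergeStepA, groupStepB]
  set nm := normalizeCategory (PySem.Dict.getD ⟨item⟩ "name" "") with hnm
  by_cases hv : PySem.Set.contains validCategories nm = true
  · rw [hv, if_neg (by simp), if_pos rfl]
    cases hg : PySem.Dict.get? g nm with
    | none =>
      have hcg : g.contains nm = false := by rw [PySem.Dict.contains_eq_isSome_get?, hg]; rfl
      have hcmf : (mapF g).contains nm = false := by rw [contains_mapF]; exact hcg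
      rw [if_pos hcmf, PySem.Dict.getD_eq_get?_getD g, hg, Option.getD_none, insert_mapF]
      rfl
    | some cands =>
      have hcg : g.contains nm = true := by rw [PySem.Dict.contains_eq_isSome_get?, hg]; rfl
      have hcmf : (mapF g).contains nm = true := by rw [contains_mapF]; exact hcg
      have hcne : cands ≠ [] := hInv.2 (nm, cands) (PySem.Dict.mem_items_of_get?_eq_some g hg)
      rw [if_neg (by rw [hcmf]; simp), PySem.Dict.getD_eq_get?_getD g, get?_mapF g, hg]
      simp only [Option.map_some, Option.getD_some]
      simp only [get?_mkItem_conf, Option.getD_some]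
      rw [insert_mapF, bestCand_append cands item hcne]
      by_cases hcmp : PySem.Dict.getD confOrder (PySem.Dict.getD ⟨item⟩ "confidence" "medium") 0 >
          PySem.Dict.getD confOrder (PySem.Dict.getD ⟨bestCand cands⟩ "confidence" "medium") 0
      · rw [if_pos hcmp, if_pos (show rk item > rk (bestCand cands) from hcmp)]
        rfl
      · rw [if_neg hcmp, if_neg (show ¬(rk item > rk (bestCand cands)) from hcmp)]
        have hmk : (mapF g).get? nm = some (mkItem nm (bestCand cands)) := by
          rw [get?_mapF, hg]; rfl
        have hnd : (mapF g).keys.Nodup := by rw [keys_mapF]; exact hInv.1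
        exact (insert_self_eq (mapF g) nm _ hnd hmk).symm
  · have hvf : PySem.Set.contains validCategories nm = false := by
      revert hv; cases PySem.Set.contains validCategories nm <;> simp
    rw [hvf, if_pos rfl, if_neg (by simp)]

theorem InvG_step (g : PySem.Dict String (List (List (String × String))))
    (hInv : InvG g) (item : List (String × String)) : InvG (groupStepB g item) := by
  unfold groupStepB
  by_cases hv : PySem.Set.contains validCategories
      (normalizeCategory (PySem.Dict.getD ⟨item⟩ "name" "")) = true
  · rw [if_pos hv]
    refine ⟨PySem.Dict.nodup_keys_insert g _ _ hInv.1, ?_⟩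
    intro p hp
    rcases (PySem.Dict.mem_items_insert g _ _ p).mp hp with h | ⟨h, _⟩
    · rw [h]
      intro hcontra
      have := congrArg List.length hcontra
      simp at this
    · exact hInv.2 p h
  · rw [if_neg hv]
    exact hInv

theorem fold_items (its : List (List (String × String)))
    (g : PySem.Dict String (List (List (String × String)))) (hInv : InvG g) :
    its.foldl mergeStepA (mapF g) = mapF (its.foldl groupStepB g) := by
  induction its generalizing g with
  | nil => rfl
  | cons it rest ih =>
    rw [List.foldl_cons, List.foldl_cons, step_comm g hInv it]
    exact ih _ (InvG_step g hInv it)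

theorem InvG_fold (its : List (List (String × String)))
    (g : PySem.Dict String (List (List (String × String)))) (hInv : InvG g) :
    InvG (its.foldl groupStepB g) := by
  induction its generalizing g with
  | nil => exact hInv
  | cons it rest ih =>
    rw [List.foldl_cons]
    exact ih _ (InvG_step g hInv it)

theorem fold_preds (cps : List (List (String × List (List (String × String)))))
    (g : PySem.Dict String (List (List (String × String)))) (hInv : InvG g) :
    cps.foldl (fun seen pred =>
      if pred.isEmpty then seen
      else (PySem.Dict.getD ⟨pred⟩ "items" []).foldl mergeStepA seen) (mapF g) =
    mapF (cps.foldl (fun groups pred =>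
      if pred.isEmpty then groups
      else (PySem.Dict.getD ⟨pred⟩ "items" []).foldl groupStepB groups) g) := by
  induction cps generalizing g with
  | nil => rfl
  | cons pred rest ih =>
    rw [List.foldl_cons, List.foldl_cons]
    by_cases hp : pred.isEmpty
    · rw [if_pos hp, if_pos hp]
      exact ih g hInv
    · rw [if_neg hp, if_neg hp, fold_items _ g hInv]
      exact ih _ (InvG_fold _ g hInv)

theorem InvG_empty : InvG PySem.Dict.empty := by
  refine ⟨?_, ?_⟩
  · rw [PySem.Dict.keys_empty]
    exact List.nodup_nil
  · intro p hp
    exact absurd hp (List.not_mem_nil)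

-- ===== VERDICT (by name: the statement is the Claim_ definition above) =====
theorem merge_predictions_spec : Claim_equal_merge_predictions := by
  intro cps _
  show merge_predictions cps = merge_predictions_alt cps
  simp only [merge_predictions, merge_predictions_alt]
  rw [show (PySem.Dict.empty : PySem.Dict String (List (String × String))) =
      mapF PySem.Dict.empty from rfl,
    fold_preds cps PySem.Dict.empty InvG_empty, values_mapF]
  rfl
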